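-- pv_equiv track=rewrite | github.com/Siju302/Project-on-BitPlay1 | main.py | rightmost_set_bit_position
-- ===== SOURCE A (Python) =====
-- def rightmost_set_bit_position(n):
--     if n == 0:
--         return 0  # No set bit
--     position = 1
--     while (n & 1) == 0:
--         n = n >> 1
--         position += 1
--     return position
-- ===== SOURCE B (Python) =====
-- def rightmost_set_bit_position(n):
--     # closed form: the lowest set bit of n (two's complement) has the answer as its bit_length
--     return (n & -n).bit_length()
-- ===== Notes on version B (the rewrite author's own statement) =====
-- stated objective: simpler
-- what changed: Replaces the shift-and-count loop with the closed form (n & -n).bit_length(), which isolates the lowest set bit and reads off its position with no loop.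
import Mathlib
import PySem

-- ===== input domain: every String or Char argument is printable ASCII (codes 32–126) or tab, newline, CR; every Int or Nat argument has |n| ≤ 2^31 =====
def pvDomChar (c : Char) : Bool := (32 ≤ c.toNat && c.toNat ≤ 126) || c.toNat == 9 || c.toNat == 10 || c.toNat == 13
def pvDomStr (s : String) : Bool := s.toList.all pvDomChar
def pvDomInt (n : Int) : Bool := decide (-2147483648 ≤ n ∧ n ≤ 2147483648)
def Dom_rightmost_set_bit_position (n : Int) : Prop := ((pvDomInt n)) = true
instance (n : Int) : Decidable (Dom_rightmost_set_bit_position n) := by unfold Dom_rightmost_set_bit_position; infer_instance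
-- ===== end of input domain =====

-- B replaces A's shift-and-count loop by the closed form (n & -n).bit_length() (simpler, no loop).


-- ===== PORT A =====
-- `>>> 1` on Int, computed on each constructor (used for the loop's termination)
theorem pv_shift_ofNat (b : Nat) : (Int.ofNat (b + 1)) >>> (1 : Nat) = Int.ofNat ((b + 1) / 2) := by
  show Int.shiftRight _ _ = _
  rw [Int.shiftRight]
  rw [Nat.shiftRight_succ, Nat.shiftRight_zero]

theorem pv_shift_negSucc (b : Nat) : (Int.negSucc b) >>> (1 : Nat) = Int.negSucc (b / 2) := by
  show Int.shiftRight _ _ = _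
  rw [Int.shiftRight]
  rw [Nat.shiftRight_succ, Nat.shiftRight_zero]

-- A's while loop, recursing on `position`-accumulating state; PySem.Int.band is
-- Python's `&`, `>>> 1` is Python's `>> 1` (floor shift, also on negatives).
-- The `n = 0` branch is ONLY a totality guard: it is never reached from
-- `rightmost_set_bit_position` (n = 0 returns early there, and shifting a
-- nonzero even number right by one never yields 0).
def rmLoop (n : Int) (position : Int) : Int :=
  if _hz : n = 0 then position
  else if _he : PySem.Int.band n 1 = 0 then rmLoop (n >>> (1 : Nat)) (position + 1)
  else position
termination_by n.natAbs
decreasing_by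
  cases n with
  | ofNat a =>
    cases a with
    | zero => exact absurd rfl _hz
    | succ b => rw [pv_shift_ofNat]; simp [Int.natAbs]; omega
  | negSucc b =>
    cases b with
    | zero => exact absurd _he (by decide)
    | succ c => rw [pv_shift_negSucc]; simp [Int.natAbs]; omega

def rightmost_set_bit_position (n : Int) : Int :=
  if n = 0 then 0
  else rmLoop n 1

-- ===== PORT B =====
-- Source B: return (n & -n).bit_length()  — PySem.Int.band / bitLength are Python's
-- exact `&` and bit_length (two's complement on negatives).
def rightmost_set_bit_position_alt (n : Int) : Int :=
  (PySem.Int.bitLength (PySem.Int.band n (-n)) : Int)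

-- ===== PRECONDITION & SPEC =====
def Spec_rightmost_set_bit_position (n : Int) (out : Int) : Prop := out = rightmost_set_bit_position_alt n
instance (n : Int) (out : Int) : Decidable (Spec_rightmost_set_bit_position n out) := by unfold Spec_rightmost_set_bit_position; infer_instance

-- ===== CLAIM (what is proved, stated in full; the proofs are below) =====
def Claim_equal_rightmost_set_bit_position : Prop := ∀ (n : Int), Dom_rightmost_set_bit_position n → Spec_rightmost_set_bit_position n (rightmost_set_bit_position n)

-- ===== LEMMAS AND PROOFS =====

-- the lowest set bit of a positive natural number, as `a - (a & (a-1))`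
def pvLow (a : Nat) : Nat := a - (a &&& (a - 1))

theorem pv_low_odd {a : Nat} (h : a % 2 = 1) : pvLow a = 1 := by
  obtain ⟨m, rfl⟩ : ∃ m, a = 2 * m + 1 := ⟨a / 2, by omega⟩
  have key := Nat.land_bit true m false m
  simp [Nat.bit] at key
  unfold pvLow
  rw [show 2 * m + 1 - 1 = 2 * m from by omega, key]
  omega

theorem pv_low_even {a : Nat} (h : a % 2 = 0) (h0 : a ≠ 0) : pvLow a = 2 * pvLow (a / 2) := by
  obtain ⟨m, rfl⟩ : ∃ m, a = 2 * (m + 1) := ⟨a / 2 - 1, by omega⟩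
  have key := Nat.land_bit false (m + 1) true m
  simp [Nat.bit] at key
  have hle : (m + 1) &&& m ≤ m + 1 := Nat.and_le_left
  unfold pvLow
  rw [show 2 * (m + 1) - 1 = 2 * m + 1 from by omega, key,
      show 2 * (m + 1) / 2 = m + 1 from by omega,
      show m + 1 - 1 = m from by omega]
  omega

theorem pv_low_pos : ∀ a : Nat, a ≠ 0 → 0 < pvLow a := by
  intro a
  induction a using Nat.strong_induction_on with
  | _ a ih =>
    intro h0
    rcases Nat.even_or_odd a with he | ho
    · have hm := Nat.even_iff.mp he
      rw [pv_low_even hm h0]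
      have := ih (a / 2) (by omega) (by omega)
      omega
    · rw [pv_low_odd (Nat.odd_iff.mp ho)]; omega

-- Python's n & -n extracts the lowest set bit of |n| (two's complement)
theorem pv_band_neg_self (n : Int) (h : n ≠ 0) :
    PySem.Int.band n (-n) = ((pvLow n.natAbs : Nat) : Int) := by
  rcases lt_or_gt_of_ne h with hneg | hpos
  · show (if 0 ≤ n then _ else _) = _
    rw [if_neg (by omega), if_pos (by omega)]
    unfold pvLow
    rw [show (-n).toNat = n.natAbs from by omega,
        show (-n - 1).toNat = n.natAbs - 1 from by omega]
  · show (if 0 ≤ n then _ else _) = _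
    rw [if_pos (by omega), if_neg (by omega)]
    unfold pvLow
    rw [show n.toNat = n.natAbs from by omega,
        show (- -n - 1).toNat = n.natAbs - 1 from by omega]

-- Python's n & 1 tests parity (via n & 1 = n mod 2, floored mod)
theorem pv_parity (n : Int) : PySem.Int.band n 1 = 0 ↔ n.natAbs % 2 = 0 := by
  rw [PySem.Int.band_one]
  unfold PySem.Int.mod
  rw [Int.fmod_eq_emod]
  simp
  omega

theorem pv_shift_natAbs {n : Int} (h : n ≠ 0) (he : n.natAbs % 2 = 0) :
    (n >>> (1 : Nat)).natAbs = n.natAbs / 2 ∧ n >>> (1 : Nat) ≠ 0 := by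
  cases n with
  | ofNat a =>
    cases a with
    | zero => exact absurd rfl h
    | succ b =>
      rw [pv_shift_ofNat]
      simp [Int.natAbs] at *
      omega
  | negSucc b =>
    rw [pv_shift_negSucc]
    simp [Int.natAbs] at *
    omega

theorem pv_bitLength_double {x : Nat} (h : x ≠ 0) :
    PySem.Int.bitLength ((2 * x : Nat) : Int) = PySem.Int.bitLength ((x : Nat) : Int) + 1 := by
  have := PySem.Int.bitLength_natCast (m := 2 * x) (by omega)
  rw [show 2 * x / 2 = x from by omega] at this
  exact this

theorem pv_rmLoop_eq : ∀ a : Nat, ∀ n : Int, n.natAbs = a → n ≠ 0 → ∀ p : Int,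
    rmLoop n p = p - 1 + (PySem.Int.bitLength ((pvLow a : Nat) : Int) : Int) := by
  intro a
  induction a using Nat.strong_induction_on with
  | _ a ih =>
    intro n hna hn p
    rw [rmLoop]
    simp only [hn, dite_false]
    split
    · -- even branch: shift right, count one more
      rename_i heq
      have hev : n.natAbs % 2 = 0 := (pv_parity n).mp heq
      have h0 : a ≠ 0 := by omega
      obtain ⟨hs, hnz⟩ := pv_shift_natAbs hn hev
      have hrec := ih (a / 2) (by omega) (n >>> (1 : Nat)) (by omega) hnz (p + 1)
      have hp : pvLow (a / 2) ≠ 0 := by have := pv_low_pos (a / 2) (by omega); omega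
      rw [hrec, pv_low_even (hna ▸ hev) h0, pv_bitLength_double hp]
      omega
    · -- odd branch: the loop stops, position is the answer
      rename_i heq
      have hodd : n.natAbs % 2 = 1 := by
        have := (pv_parity n).not.mp heq; omega
      rw [pv_low_odd (hna ▸ hodd)]
      rw [show ((1 : Nat) : Int) = 1 from rfl, show PySem.Int.bitLength (1 : Int) = 1 from by decide]
      omega

-- ===== VERDICT (by name: the statement is the Claim_ definition above) =====
theorem rightmost_set_bit_position_spec : Claim_equal_rightmost_set_bit_position := by
  intro n _
  unfold Spec_rightmost_set_bit_position rightmost_set_bit_position rightmost_set_bit_position_alt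
  by_cases h : n = 0
  · subst h; decide
  · rw [if_neg h, pv_rmLoop_eq n.natAbs n rfl h 1, pv_band_neg_self n h]
    omega
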